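-- pv_equiv track=rewrite | github.com/LeeGukHeon/AutoLife | scripts/run_daily_oos_stability.py | select_recent_days
-- ===== SOURCE A (Python) =====
-- from typing import Any, Dict, List, Optional, Tuple
--
-- def select_recent_days(grouped: Dict[str, List[List[str]]], days: int, min_rows_per_day: int) -> List[str]:
--     if days <= 0:
--         return []
--     ordered = sorted(grouped.keys())
--     selected: List[str] = []
--     for day in reversed(ordered):
--         row_count = len(grouped.get(day, []))
--         if row_count < int(min_rows_per_day):
--             continue
--         selected.append(day)
--         if len(selected) >= int(days):
--             break
--     selected.reverse()
--     return selected
-- ===== SOURCE B (Python) =====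
-- from typing import Any, Dict, List, Optional, Tuple
--
-- def select_recent_days(grouped: Dict[str, List[List[str]]], days: int, min_rows_per_day: int) -> List[str]:
--     if days <= 0:
--         return []
--     qualifying = [day for day in sorted(grouped)
--                   if len(grouped.get(day, [])) >= int(min_rows_per_day)]
--     return qualifying[-days:]
-- ===== Notes on version B (the rewrite author's own statement) =====
-- stated objective: simpler
-- what changed: Replaces the reversed scan with early break, append accumulator and trailing reverse by a filter of the sorted keys followed by a single negative slice taking the last `days` entries.
import Mathlib
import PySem

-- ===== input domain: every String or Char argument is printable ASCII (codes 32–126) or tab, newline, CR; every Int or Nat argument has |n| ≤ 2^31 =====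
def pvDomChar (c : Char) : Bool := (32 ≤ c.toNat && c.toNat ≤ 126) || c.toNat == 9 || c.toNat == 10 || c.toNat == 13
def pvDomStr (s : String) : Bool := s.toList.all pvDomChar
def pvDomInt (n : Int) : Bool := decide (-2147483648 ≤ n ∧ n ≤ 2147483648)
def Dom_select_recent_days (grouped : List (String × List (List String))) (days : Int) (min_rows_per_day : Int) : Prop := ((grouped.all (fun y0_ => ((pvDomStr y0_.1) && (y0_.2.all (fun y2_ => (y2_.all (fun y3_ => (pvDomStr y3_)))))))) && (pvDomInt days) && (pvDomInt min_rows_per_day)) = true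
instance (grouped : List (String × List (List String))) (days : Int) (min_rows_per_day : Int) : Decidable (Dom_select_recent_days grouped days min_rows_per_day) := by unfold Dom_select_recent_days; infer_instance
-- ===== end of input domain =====

-- B replaces A's reversed scan with early break and trailing reverse by filtering the
-- sorted keys and taking the last `days` entries with one negative slice (simpler).


-- ===== PORT A =====
-- the for-loop with `continue`/`break` over reversed(ordered), accumulator `selected`
def selLoopA (d : PySem.Dict String (List (List String))) (days min_rows_per_day : Int) :
    List String → List String → List String
  | [], selected => selected
  | day :: rest, selected =>
    let row_count : Int := (d.getD day []).length
    if row_count < min_rows_per_day then selLoopA d days min_rows_per_day rest selected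
    else
      let selected' := selected ++ [day]
      if days ≤ (selected'.length : Int) then selected'
      else selLoopA d days min_rows_per_day rest selected'

def select_recent_days (grouped : List (String × List (List String))) (days : Int) (min_rows_per_day : Int) : List String :=
  if days ≤ 0 then []
  else
    let d := PySem.Dict.ofList grouped
    let ordered := PySem.List.sorted d.keys (fun x => x) false
    (selLoopA d days min_rows_per_day ordered.reverse []).reverse

-- ===== PORT B =====
def select_recent_days_alt (grouped : List (String × List (List String))) (days : Int) (min_rows_per_day : Int) : List String :=
  if days ≤ 0 then []
  else
    let d := PySem.Dict.ofList grouped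
    let qualifying := (PySem.List.sorted d.keys (fun x => x) false).filter
        (fun day => min_rows_per_day ≤ ((d.getD day []).length : Int))
    PySem.List.slice qualifying (some (-days)) none

-- ===== PRECONDITION & SPEC =====
def Spec_select_recent_days (grouped : List (String × List (List String))) (days : Int) (min_rows_per_day : Int) (out : List String) : Prop := out = select_recent_days_alt grouped days min_rows_per_day
instance (grouped : List (String × List (List String))) (days : Int) (min_rows_per_day : Int) (out : List String) : Decidable (Spec_select_recent_days grouped days min_rows_per_day out) := by unfold Spec_select_recent_days; infer_instance

-- ===== CLAIM (what is proved, stated in full; the proofs are below) =====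
def Claim_equal_select_recent_days : Prop := ∀ (grouped : List (String × List (List String))) (days : Int) (min_rows_per_day : Int), Dom_select_recent_days grouped days min_rows_per_day → Spec_select_recent_days grouped days min_rows_per_day (select_recent_days grouped days min_rows_per_day)

-- ===== LEMMAS AND PROOFS =====

-- A's loop collects, in scan order, the first (days - |selected|) elements passing the filter.
theorem selLoopA_eq (d : PySem.Dict String (List (List String))) (days minr : Int)
    (L : List String) : ∀ (sel : List String), (sel.length : Int) < days →
    selLoopA d days minr L sel
      = sel ++ (L.filter (fun day => minr ≤ ((d.getD day []).length : Int))).take (days - sel.length).toNat := by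
  induction L with
  | nil => intro sel h; simp [selLoopA]
  | cons day rest ih =>
    intro sel h
    simp only [selLoopA]
    have hl : (sel ++ [day]).length = sel.length + 1 := by simp
    by_cases hp : ((d.getD day []).length : Int) < minr
    · rw [if_pos hp, ih sel h]
      have hnq : ¬ (minr ≤ ((d.getD day []).length : Int)) := by omega
      simp [hnq]
    · rw [if_neg hp]
      have hq : (minr ≤ ((d.getD day []).length : Int)) := by omega
      by_cases hstop : days ≤ (((sel ++ [day]).length : Int))
      · rw [if_pos hstop]
        have hk : (days - sel.length).toNat = 1 := by
          rw [hl] at hstop; push_cast at hstop; omega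
        simp [hq, hk]
      · rw [if_neg hstop]
        rw [ih (sel ++ [day]) (by omega)]
        have hk : (days - sel.length).toNat = (days - ((sel ++ [day]).length : Int)).toNat + 1 := by
          rw [hl] at hstop ⊢; push_cast at hstop ⊢; omega
        simp [hq, hk]

-- (l.reverse.take n).reverse is the length-n suffix of l
theorem reverse_take_reverse {α : Type} (l : List α) (n : Nat) :
    (l.reverse.take n).reverse = l.drop (l.length - n) := by
  rw [List.take_reverse]
  simp

-- ===== VERDICT (by name: the statement is the Claim_ definition above) =====
theorem select_recent_days_spec : Claim_equal_select_recent_days := by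
  intro grouped days minr _
  unfold Spec_select_recent_days select_recent_days select_recent_days_alt
  by_cases hd : days ≤ 0
  · simp [hd]
  · simp only [hd, if_false]
    have hpos : 0 < days := by omega
    set d := PySem.Dict.ofList grouped
    set ordered := PySem.List.sorted d.keys (fun x => x) false with hord
    have hloop := selLoopA_eq d days minr ordered.reverse [] (by simpa using hpos)
    rw [hloop]
    have hcast : -days = -((days.toNat : Nat) : Int) := by omega
    rw [hcast, PySem.List.slice_from_neg_natCast _ _ (by omega)]
    rw [show ordered.reverse.filter (fun day => minr ≤ ((d.getD day []).length : Int))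
          = (ordered.filter (fun day => minr ≤ ((d.getD day []).length : Int))).reverse
        from by simp [List.filter_reverse]]
    simp only [List.nil_append]
    rw [show (days - ((([] : List String)).length : Int)).toNat = days.toNat from by simp]
    exact reverse_take_reverse _ _
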